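-- pv_equiv track=rewrite | github.com/eddiethedean/pyd3js | packages/pyd3js-transition/src/pyd3js_transition/transition/on.py | _is_start_only
-- ===== SOURCE A (Python) =====
-- def _is_start_only(name: str) -> bool:
--     for t in name.strip().split():
--         i = t.find(".")
--         if i >= 0:
--             t = t[:i]
--         if t and t != "start":
--             return False
--     return True
-- ===== SOURCE B (Python) =====
-- def _is_start_only(name: str) -> bool:
--     # Single-pass character DFA: no tokenization, no slicing.
--     # p = number of chars of "start" matched in the current token;
--     # p == -1 means the rest of the current token is irrelevant.
--     ok = True
--     p = 0
--     for c in name: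
--         if c.isspace():
--             ok = ok and p in (-1, 0, 5)
--             p = 0
--         elif p == -1:
--             pass
--         elif c == ".":
--             ok = ok and p in (0, 5)
--             p = -1
--         elif p < 5 and c == "start"[p]:
--             p += 1
--         else:
--             ok = False
--             p = -1
--     return ok and p in (-1, 0, 5)
-- ===== Notes on version B (the rewrite author's own statement) =====
-- stated objective: alternative
-- what changed: Replaces tokenize-then-check (strip/split/find/slice per token with early return) by a single left-to-right character-level finite-state machine that never materializes tokens or substrings.
import Mathlib
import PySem

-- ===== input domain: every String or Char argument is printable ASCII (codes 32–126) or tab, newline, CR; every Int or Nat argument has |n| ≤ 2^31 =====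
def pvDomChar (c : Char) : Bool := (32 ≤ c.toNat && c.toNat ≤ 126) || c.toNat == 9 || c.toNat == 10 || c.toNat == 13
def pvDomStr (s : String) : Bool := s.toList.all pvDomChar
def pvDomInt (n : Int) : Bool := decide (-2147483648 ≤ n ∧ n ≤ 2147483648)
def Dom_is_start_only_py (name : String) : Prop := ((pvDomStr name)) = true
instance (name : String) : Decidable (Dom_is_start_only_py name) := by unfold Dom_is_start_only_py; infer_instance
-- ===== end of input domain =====

-- B replaces A's tokenize-then-check scan by a single-pass character-level state machine (alternative decomposition; same cost).

-- ===== PORT A =====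
def isStartOnlyLoop : List String → Bool
  | [] => true
  | t :: rest =>
      let i := PySem.Str.find t "."
      let t' := if 0 ≤ i then PySem.Str.slice t none (some i) else t
      if t' ≠ "" ∧ t' ≠ "start" then false else isStartOnlyLoop rest

def is_start_only_py (name : String) : Bool :=
  isStartOnlyLoop (PySem.Str.split₀ (PySem.Str.strip name))

-- ===== PORT B =====
-- One step of the DFA of Source B: state = (ok, p); p counts chars of "start" matched
-- in the current token, p = -1 means the rest of the current token is irrelevant.
def pvDfaStep (st : Bool × Int) (c : Char) : Bool × Int :=
  if PySem.Chars.isspace c then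
    (st.1 && (st.2 == -1 || st.2 == 0 || st.2 == 5), 0)
  else if st.2 == -1 then st
  else if c == '.' then
    (st.1 && (st.2 == 0 || st.2 == 5), -1)
  else if decide (st.2 < 5) && (PySem.Str.pyGet? "start" st.2 == some c) then
    (st.1, st.2 + 1)
  else
    (false, -1)

def is_start_only_py_alt (name : String) : Bool :=
  let st := name.toList.foldl pvDfaStep (true, 0)
  st.1 && (st.2 == -1 || st.2 == 0 || st.2 == 5)

-- ===== PRECONDITION & SPEC =====
def Spec_is_start_only_py (name : String) (out : Bool) : Prop := out = is_start_only_py_alt name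
instance (name : String) (out : Bool) : Decidable (Spec_is_start_only_py name out) := by unfold Spec_is_start_only_py; infer_instance

-- ===== CLAIM (what is proved, stated in full; the proofs are below) =====
def Claim_equal_is_start_only_py : Prop := ∀ (name : String), Dom_is_start_only_py name → Spec_is_start_only_py name (is_start_only_py name)

-- ===== LEMMAS AND PROOFS =====

def pvStart : List Char := ['s', 't', 'a', 'r', 't']

-- a token is acceptable iff its prefix before the first '.' is "" or "start"
def pvGood (t : List Char) : Bool :=
  let pre := t.takeWhile (· ≠ '.')
  pre == [] || pre == pvStart

-- recursive spec of B's DFA run from state (true, p)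
def pvG : Int → List Char → Bool
  | p, [] => (p == -1 || p == 0 || p == 5)
  | p, c :: cs =>
      if PySem.Chars.isspace c then (p == -1 || p == 0 || p == 5) && pvG 0 cs
      else if p == -1 then pvG (-1) cs
      else if c == '.' then (p == 0 || p == 5) && pvG (-1) cs
      else if decide (p < 5) && (PySem.Str.pyGet? "start" p == some c) then pvG (p + 1) cs
      else false

-- "all remaining tokens good, given pending (reversed) current token cur"
def pvAccGood (cs cur : List Char) : Bool :=
  (PySem.Chars.split₀.go cs cur []).all pvGood

theorem pvFold_final (cs : List Char) (ok : Bool) (p : Int) :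
    ((cs.foldl pvDfaStep (ok, p)).1
       && ((cs.foldl pvDfaStep (ok, p)).2 == -1 || (cs.foldl pvDfaStep (ok, p)).2 == 0
             || (cs.foldl pvDfaStep (ok, p)).2 == 5))
      = (ok && pvG p cs) := by
  induction cs generalizing ok p with
  | nil => simp [pvG]
  | cons c rest ih =>
    simp only [List.foldl_cons]
    by_cases hsp : PySem.Chars.isspace c = true
    · rw [show pvDfaStep (ok, p) c
          = (ok && (p == -1 || p == 0 || p == 5), 0) by simp [pvDfaStep, hsp]]
      rw [ih, show pvG p (c :: rest)
          = ((p == -1 || p == 0 || p == 5) && pvG 0 rest) by simp [pvG, hsp]]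
      rw [Bool.and_assoc]
    · have hsp' : PySem.Chars.isspace c = false := by simpa using hsp
      by_cases hm1 : (p == -1) = true
      · have hp : p = -1 := by simpa using hm1
        subst hp
        rw [show pvDfaStep (ok, -1) c = (ok, -1) by simp [pvDfaStep, hsp']]
        rw [ih, show pvG (-1) (c :: rest) = pvG (-1) rest by simp [pvG, hsp']]
      · have hm1' : (p == -1) = false := by simpa using hm1
        by_cases hdot : (c == '.') = true
        · rw [show pvDfaStep (ok, p) c
              = (ok && (p == 0 || p == 5), -1) by simp [pvDfaStep, hsp', hm1', hdot]]
          rw [ih, show pvG p (c :: rest)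
              = ((p == 0 || p == 5) && pvG (-1) rest) by simp [pvG, hsp', hm1', hdot]]
          rw [Bool.and_assoc]
        · have hdot' : (c == '.') = false := by simpa using hdot
          by_cases hmatch : (decide (p < 5) && (PySem.Str.pyGet? "start" p == some c)) = true
          · rw [show pvDfaStep (ok, p) c
                = (ok, p + 1) by simp only [pvDfaStep, hsp', hm1', hdot', hmatch]; simp]
            rw [ih, show pvG p (c :: rest) = pvG (p + 1) rest by
              simp only [pvG, hsp', hm1', hdot', hmatch]; simp]
          · have hmatch' : (decide (p < 5) && (PySem.Str.pyGet? "start" p == some c)) = false := by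
              simpa using hmatch
            rw [show pvDfaStep (ok, p) c = (false, -1) by
              simp only [pvDfaStep, hsp', hm1', hdot', hmatch']; simp]
            rw [ih, show pvG p (c :: rest) = false by
              simp only [pvG, hsp', hm1', hdot', hmatch']; simp]
            simp

theorem pvGo_acc (cs cur : List Char) (acc : List (List Char)) :
    PySem.Chars.split₀.go cs cur acc = acc.reverse ++ PySem.Chars.split₀.go cs cur [] := by
  induction cs generalizing cur acc with
  | nil => simp [PySem.Chars.split₀.go]; split <;> simp
  | cons c rest ih =>
    simp only [PySem.Chars.split₀.go]
    by_cases hsp : PySem.Chars.isspace c = true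
    · simp only [hsp, if_true]
      by_cases he : cur.isEmpty
      · simp [he, ih [] acc]
      · simp only [he, Bool.false_eq_true, if_false]
        rw [ih [] (cur.reverse :: acc), ih [] [cur.reverse]]
        simp
    · simp only [hsp, Bool.false_eq_true, if_false]
      exact ih (c :: cur) acc

theorem pvAccGood_nil (cur : List Char) :
    pvAccGood [] cur = if cur.isEmpty then true else pvGood cur.reverse := by
  unfold pvAccGood
  simp only [PySem.Chars.split₀.go]
  split <;> simp

theorem pvAccGood_cons (c : Char) (cs cur : List Char) :
    pvAccGood (c :: cs) cur
      = if PySem.Chars.isspace c then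
          (if cur.isEmpty then pvAccGood cs [] else pvGood cur.reverse && pvAccGood cs [])
        else pvAccGood cs (c :: cur) := by
  unfold pvAccGood
  simp only [PySem.Chars.split₀.go]
  by_cases hsp : PySem.Chars.isspace c = true
  · simp only [hsp, if_true]
    by_cases he : cur.isEmpty
    · simp [he]
    · simp only [he, Bool.false_eq_true, if_false]
      rw [pvGo_acc cs [] (cur.reverse :: [])]
      simp
  · simp [hsp]

theorem pvTakeWhile_stable (l l' : List Char) (h : '.' ∈ l) :
    (l ++ l').takeWhile (· ≠ '.') = l.takeWhile (· ≠ '.') := by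
  induction l with
  | nil => simp at h
  | cons a l ih =>
    by_cases ha : a = '.'
    · subst ha; simp
    · simp only [List.mem_cons] at h
      rcases h with h | h
      · exact absurd h.symm ha
      · have h2 := ih h
        simp only [List.cons_append, List.takeWhile_cons]
        have hpa : decide (a ≠ '.') = true := by simp [ha]
        rw [hpa, h2]

theorem pvGood_nil : pvGood [] = true := rfl

theorem isEmpty_false_of_ne {cur : List Char} (hne : cur ≠ []) : cur.isEmpty = false := by
  cases cur with
  | nil => exact absurd rfl hne
  | cons a l => rfl

theorem pvAcc_bad (cs : List Char) :
    ∀ cur, (∀ rest, pvGood (cur.reverse ++ rest) = false) → pvAccGood cs cur = false := by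
  induction cs with
  | nil =>
    intro cur hbad
    rw [pvAccGood_nil]
    have hne : cur ≠ [] := by
      rintro rfl
      have := hbad []
      simp [pvGood_nil] at this
    rw [isEmpty_false_of_ne hne]
    simp only [Bool.false_eq_true, if_false]
    simpa using hbad []
  | cons c cs ih =>
    intro cur hbad
    rw [pvAccGood_cons]
    by_cases hsp : PySem.Chars.isspace c = true
    · rw [if_pos hsp]
      have hne : cur ≠ [] := by
        rintro rfl
        have := hbad []
        simp [pvGood_nil] at this
      rw [isEmpty_false_of_ne hne]
      simp only [Bool.false_eq_true, if_false]
      have h1 : pvGood cur.reverse = false := by simpa using hbad []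
      rw [h1, Bool.false_and]
    · rw [if_neg hsp]
      refine ih (c :: cur) (fun rest => ?_)
      have := hbad (c :: rest)
      simpa using this

theorem pvBridgeCore (cs : List Char) :
    ((∀ k : Nat, k ≤ 5 → pvG (k : Int) cs = pvAccGood cs ((pvStart.take k).reverse))
      ∧ (∀ cur, cur ≠ [] → '.' ∈ cur → pvGood cur.reverse = true → pvG (-1) cs = pvAccGood cs cur)) := by
  induction cs with
  | nil =>
    constructor
    · intro k hk
      rw [pvAccGood_nil]
      interval_cases k <;> decide
    · intro cur hne hdotm hgood
      rw [pvAccGood_nil, isEmpty_false_of_ne hne]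
      simp only [Bool.false_eq_true, if_false]
      rw [show pvG (-1) [] = true from rfl]
      exact hgood.symm
  | cons c cs ih =>
    obtain ⟨ih1, ih2⟩ := ih
    have h00 : pvG 0 cs = pvAccGood cs [] := by simpa using ih1 0 (by omega)
    constructor
    · intro k hk
      rw [pvAccGood_cons]
      by_cases hsp : PySem.Chars.isspace c = true
      · rw [if_pos hsp]
        have hG : pvG (k : Int) (c :: cs)
            = ((((k : Int)) == -1 || ((k : Int)) == 0 || ((k : Int)) == 5) && pvG 0 cs) := by
          simp [pvG, hsp]
        rw [hG, h00]
        interval_cases k <;> simp [pvGood, pvStart]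
      · have hsp' : PySem.Chars.isspace c = false := by simpa using hsp
        have hknn : (((k : Int)) == -1) = false := by
          have h : ¬ ((k : Int) = -1) := by omega
          simpa using h
        by_cases hdot : (c == '.') = true
        · have hc : c = '.' := by simp at hdot; exact hdot
          subst hc
          have hG : pvG (k : Int) ('.' :: cs)
              = ((((k : Int)) == 0 || ((k : Int)) == 5) && pvG (-1) cs) := by
            simp [pvG, hsp', hknn]
          rw [if_neg (by simp [hsp']), hG]
          interval_cases k
          · rw [ih2 ['.'] (by decide) (by decide) (by decide)]
            simp
          · rw [pvAcc_bad cs _ (fun rest => by simp [pvGood, pvStart])]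
            simp
          · rw [pvAcc_bad cs _ (fun rest => by simp [pvGood, pvStart])]
            simp
          · rw [pvAcc_bad cs _ (fun rest => by simp [pvGood, pvStart])]
            simp
          · rw [pvAcc_bad cs _ (fun rest => by simp [pvGood, pvStart])]
            simp
          · rw [ih2 ('.' :: pvStart.reverse) (by decide) (by decide) (by decide)]
            simp [pvStart]
        · have hdot' : (c == '.') = false := by simpa using hdot
          have hcd : ¬ c = '.' := by simpa using hdot
          by_cases hmatch : (decide ((k : Int) < 5) && (PySem.Str.pyGet? "start" (k : Int) == some c)) = true
          · have hG : pvG (k : Int) (c :: cs) = pvG ((k : Int) + 1) cs := by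
              simp only [pvG]
              rw [if_neg hsp, if_neg (by simp [hknn]), if_neg (by simp [hdot']), if_pos hmatch]
            rw [if_neg hsp, hG]
            interval_cases k
            · have h5 : PySem.Str.pyGet? "start" (((0 : Nat) : Int)) = some 's' := by decide
              rw [h5] at hmatch
              have hc : 's' = c := by simpa using hmatch
              subst hc
              simpa [pvStart] using ih1 1 (by omega)
            · have h5 : PySem.Str.pyGet? "start" (((1 : Nat) : Int)) = some 't' := by decide
              rw [h5] at hmatch
              have hc : 't' = c := by simpa using hmatch
              subst hc
              simpa [pvStart] using ih1 2 (by omega)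
            · have h5 : PySem.Str.pyGet? "start" (((2 : Nat) : Int)) = some 'a' := by decide
              rw [h5] at hmatch
              have hc : 'a' = c := by simpa using hmatch
              subst hc
              simpa [pvStart] using ih1 3 (by omega)
            · have h5 : PySem.Str.pyGet? "start" (((3 : Nat) : Int)) = some 'r' := by decide
              rw [h5] at hmatch
              have hc : 'r' = c := by simpa using hmatch
              subst hc
              simpa [pvStart] using ih1 4 (by omega)
            · have h5 : PySem.Str.pyGet? "start" (((4 : Nat) : Int)) = some 't' := by decide
              rw [h5] at hmatch
              have hc : 't' = c := by simpa using hmatch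
              subst hc
              simpa [pvStart] using ih1 5 (by omega)
            · exfalso
              have h5 : ¬ (((5 : Nat) : Int) < 5) := by omega
              rw [Bool.and_eq_true, decide_eq_true_iff] at hmatch
              exact h5 hmatch.1
          · have hmatch' : (decide ((k : Int) < 5) && (PySem.Str.pyGet? "start" (k : Int) == some c)) = false := by
              simpa using hmatch
            have hG : pvG (k : Int) (c :: cs) = false := by
              simp only [pvG]
              rw [if_neg hsp, if_neg (by simp [hknn]), if_neg (by simp [hdot']), if_neg hmatch]
            rw [if_neg hsp, hG]
            interval_cases k
            · have h5 : PySem.Str.pyGet? "start" (((0 : Nat) : Int)) = some 's' := by decide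
              rw [h5] at hmatch'
              have htmp : ¬ 's' = c := by simpa using hmatch'
              have hcne : ¬ c = 's' := fun h => htmp h.symm
              rw [pvAcc_bad cs _ (fun rest => by simp [pvGood, pvStart, hcd, hcne])]
            · have h5 : PySem.Str.pyGet? "start" (((1 : Nat) : Int)) = some 't' := by decide
              rw [h5] at hmatch'
              have htmp : ¬ 't' = c := by simpa using hmatch'
              have hcne : ¬ c = 't' := fun h => htmp h.symm
              rw [pvAcc_bad cs _ (fun rest => by simp [pvGood, pvStart, hcd, hcne])]
            · have h5 : PySem.Str.pyGet? "start" (((2 : Nat) : Int)) = some 'a' := by decide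
              rw [h5] at hmatch'
              have htmp : ¬ 'a' = c := by simpa using hmatch'
              have hcne : ¬ c = 'a' := fun h => htmp h.symm
              rw [pvAcc_bad cs _ (fun rest => by simp [pvGood, pvStart, hcd, hcne])]
            · have h5 : PySem.Str.pyGet? "start" (((3 : Nat) : Int)) = some 'r' := by decide
              rw [h5] at hmatch'
              have htmp : ¬ 'r' = c := by simpa using hmatch'
              have hcne : ¬ c = 'r' := fun h => htmp h.symm
              rw [pvAcc_bad cs _ (fun rest => by simp [pvGood, pvStart, hcd, hcne])]
            · have h5 : PySem.Str.pyGet? "start" (((4 : Nat) : Int)) = some 't' := by decide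
              rw [h5] at hmatch'
              have htmp : ¬ 't' = c := by simpa using hmatch'
              have hcne : ¬ c = 't' := fun h => htmp h.symm
              rw [pvAcc_bad cs _ (fun rest => by simp [pvGood, pvStart, hcd, hcne])]
            · rw [pvAcc_bad cs _ (fun rest => by simp [pvGood, pvStart, hcd])]
    · intro cur hne hdotm hgood
      rw [pvAccGood_cons]
      by_cases hsp : PySem.Chars.isspace c = true
      · rw [if_pos hsp, isEmpty_false_of_ne hne]
        simp only [Bool.false_eq_true, if_false]
        have hG : pvG (-1) (c :: cs) = pvG 0 cs := by simp [pvG, hsp]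
        rw [hG, h00, hgood, Bool.true_and]
      · have hsp' : PySem.Chars.isspace c = false := by simpa using hsp
        have hG : pvG (-1) (c :: cs) = pvG (-1) cs := by simp [pvG, hsp']
        rw [if_neg hsp, hG]
        refine ih2 (c :: cur) (by simp) (List.mem_cons_of_mem _ hdotm) ?_
        have hst : pvGood (cur.reverse ++ [c]) = pvGood cur.reverse := by
          unfold pvGood
          rw [pvTakeWhile_stable _ _ (by simpa using hdotm)]
        rw [List.reverse_cons, hst]
        exact hgood

theorem pvBridge (cs : List Char) :
    ((∀ k : Nat, k ≤ 5 → pvG (k : Int) cs = pvAccGood cs ((pvStart.take k).reverse))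
      ∧ (∀ cur, cur ≠ [] → '.' ∈ cur → pvGood cur.reverse = true → pvG (-1) cs = pvAccGood cs cur)
      ∧ (∀ cur, (∀ rest, pvGood (cur.reverse ++ rest) = false) → pvAccGood cs cur = false)) :=
  ⟨(pvBridgeCore cs).1, (pvBridgeCore cs).2, pvAcc_bad cs⟩

-- ===== A-side lemmas (A's per-token truncation = dot-prefix) =====
theorem singleton_prefix_iff (a : Char) (l : List Char) : [a] <+: l ↔ l.head? = some a := by
  cases l with
  | nil => simp
  | cons c cs => simp [List.cons_prefix_cons, eq_comm]

theorem take_eq_takeWhile (cs : List Char) (n : Nat)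
    (hn : cs[n]? = some '.') (hmin : ∀ j < n, cs[j]? ≠ some '.') :
    cs.take n = cs.takeWhile (· ≠ '.') := by
  induction cs generalizing n with
  | nil => simp at hn
  | cons c rest ih =>
    cases n with
    | zero =>
      simp at hn
      simp [hn]
    | succ m =>
      have hc : c ≠ '.' := by
        have := hmin 0 (Nat.succ_pos m)
        simpa using this
      simp only [List.take_succ_cons, List.takeWhile_cons, hc, decide_not]
      rw [ih m (by simpa using hn) (fun j hj => by
        have := hmin (j + 1) (Nat.succ_lt_succ hj)
        simpa using this)]
      simp

theorem aTok_eq (t : String) :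
    (if 0 ≤ PySem.Str.find t "." then PySem.Str.slice t none (some (PySem.Str.find t ".")) else t)
      = String.ofList (t.toList.takeWhile (· ≠ '.')) := by
  have hfind : PySem.Str.find t "." = PySem.Chars.find t.toList ['.'] := by
    simp
  by_cases h : 0 ≤ PySem.Str.find t "."
  · have h' : 0 ≤ PySem.Chars.find t.toList ['.'] := by rwa [hfind] at h
    obtain ⟨hpre, hmin⟩ := PySem.Chars.find_spec h'
    simp only [h, if_pos]
    apply String.toList_inj.mp
    have hslice : (PySem.Str.slice t none (some (PySem.Str.find t "."))).toList
        = t.toList.take (PySem.Str.find t ".").toNat := by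
      simp [PySem.Str.slice]
      exact PySem.List.slice_to _ h'
    rw [hslice]
    simp only [String.toList_ofList]
    rw [hfind]
    apply take_eq_takeWhile
    · rw [singleton_prefix_iff, List.head?_drop] at hpre
      exact hpre
    · intro j hj
      have := hmin j hj
      rw [singleton_prefix_iff, List.head?_drop] at this
      exact this
  · have hninf : ¬ ['.'] <:+: t.toList := by
      apply (PySem.Chars.find_eq_neg_one_iff t.toList ['.']).mp
      have := PySem.Chars.neg_one_le_find t.toList ['.']
      rw [hfind] at h
      omega
    have hnotmem : '.' ∉ t.toList := by
      intro hm
      obtain ⟨s1, s2, heq⟩ := List.append_of_mem hm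
      exact hninf ⟨s1, s2, by rw [heq]; simp⟩
    rw [if_neg h]
    apply String.toList_inj.mp
    rw [String.toList_ofList]
    symm
    apply List.takeWhile_eq_self_iff.mpr
    intro x hx
    simp only [decide_eq_true_eq, ne_eq]
    rintro rfl
    exact hnotmem hx

theorem loop_all (ts : List String) :
    isStartOnlyLoop ts = ts.all (fun t => pvGood t.toList) := by
  induction ts with
  | nil => rfl
  | cons t rest ih =>
    rw [List.all_cons, ← ih]
    show (if _ ≠ "" ∧ _ ≠ "start" then false else isStartOnlyLoop rest) = _
    rw [aTok_eq t]
    set pre := t.toList.takeWhile (· ≠ '.') with hpre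
    have hiff : (String.ofList pre ≠ "" ∧ String.ofList pre ≠ "start")
        ↔ ¬ (pre = [] ∨ pre = pvStart) := by
      rw [not_or]
      constructor
      · rintro ⟨h1, h2⟩
        exact ⟨fun h => h1 (by rw [h]), fun h => h2 (by rw [h]; decide)⟩
      · rintro ⟨h1, h2⟩
        refine ⟨fun h => h1 ?_, fun h => h2 ?_⟩
        · have := congrArg String.toList h
          simpa using this
        · have := congrArg String.toList h
          simpa [pvStart] using this
    have hgd : pvGood t.toList = (pre == [] || pre == pvStart) := rfl
    by_cases hg : pre = [] ∨ pre = pvStart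
    · rw [if_neg (by rw [hiff]; exact not_not_intro hg)]
      have : pvGood t.toList = true := by
        rw [hgd]
        rcases hg with h | h <;> simp [h]
      rw [this, Bool.true_and]
    · rw [if_pos (hiff.mpr hg)]
      have : pvGood t.toList = false := by
        rw [hgd, not_or] at *
        simp [hg.1, hg.2]
      rw [this, Bool.false_and]

theorem split₀_lstrip (cs : List Char) (acc : List (List Char)) :
    PySem.Chars.split₀.go (List.dropWhile PySem.Chars.isspace cs) [] acc
      = PySem.Chars.split₀.go cs [] acc := by
  induction cs with
  | nil => simp
  | cons c rest ih =>
    by_cases hsp : PySem.Chars.isspace c = true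
    · rw [List.dropWhile_cons_of_pos hsp, ih]
      simp [PySem.Chars.split₀.go, hsp]
    · rw [List.dropWhile_cons_of_neg (by simp [hsp])]

theorem go_append_ws (cs ws cur : List Char) (acc : List (List Char))
    (h : ∀ c ∈ ws, PySem.Chars.isspace c = true) :
    PySem.Chars.split₀.go (cs ++ ws) cur acc = PySem.Chars.split₀.go cs cur acc := by
  induction cs generalizing cur acc with
  | nil =>
    simp only [List.nil_append]
    induction ws generalizing cur acc with
    | nil => rfl
    | cons w ws ihw =>
      have hw : PySem.Chars.isspace w = true := h w (List.mem_cons_self ..)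
      have hws : ∀ c ∈ ws, PySem.Chars.isspace c = true :=
        fun c hc => h c (List.mem_cons_of_mem _ hc)
      simp only [PySem.Chars.split₀.go, hw, if_true]
      by_cases he : cur.isEmpty
      · simp only [he, if_true]
        rw [ihw hws]
        simp [PySem.Chars.split₀.go]
      · simp only [he, Bool.false_eq_true, if_false]
        rw [ihw hws]
        simp [PySem.Chars.split₀.go]
  | cons c rest ih =>
    simp only [List.cons_append, PySem.Chars.split₀.go]
    by_cases hsp : PySem.Chars.isspace c = true
    · simp only [hsp, if_true]
      by_cases he : cur.isEmpty <;> simp [he, ih]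
    · simp [hsp, ih]

theorem split₀_strip (cs : List Char) :
    PySem.Chars.split₀ (PySem.Chars.strip cs) = PySem.Chars.split₀ cs := by
  unfold PySem.Chars.split₀ PySem.Chars.strip PySem.Chars.rstrip PySem.Chars.lstrip
  set l := List.dropWhile PySem.Chars.isspace cs with hl
  have hdecomp : l = (List.dropWhile PySem.Chars.isspace l.reverse).reverse
      ++ (List.takeWhile PySem.Chars.isspace l.reverse).reverse := by
    have h1 : l.reverse = List.takeWhile PySem.Chars.isspace l.reverse
        ++ List.dropWhile PySem.Chars.isspace l.reverse :=
      (List.takeWhile_append_dropWhile ..).symm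
    calc l = l.reverse.reverse := (List.reverse_reverse l).symm
      _ = _ := by conv_lhs => rw [h1]; rw [List.reverse_append]
  rw [← split₀_lstrip cs, ← hl]
  conv_rhs => rw [hdecomp]
  rw [go_append_ws]
  intro c hc
  have := List.mem_takeWhile_imp (by simpa using hc)
  exact this

-- ===== VERDICT (by name: the statement is the Claim_ definition above) =====
theorem is_start_only_py_spec : Claim_equal_is_start_only_py := by
  intro name _
  unfold Spec_is_start_only_py
  have hB : is_start_only_py_alt name = pvAccGood name.toList [] := by
    show ((name.toList.foldl pvDfaStep (true, 0)).1
       && ((name.toList.foldl pvDfaStep (true, 0)).2 == -1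
            || (name.toList.foldl pvDfaStep (true, 0)).2 == 0
            || (name.toList.foldl pvDfaStep (true, 0)).2 == 5)) = pvAccGood name.toList []
    rw [pvFold_final]
    have h0 := (pvBridge name.toList).1 0 (by omega)
    simp only [List.take_zero, List.reverse_nil, Nat.cast_zero] at h0
    rw [Bool.true_and]
    exact h0
  have hA : is_start_only_py name = pvAccGood name.toList [] := by
    unfold is_start_only_py
    rw [loop_all]
    have hmap : (PySem.Str.split₀ (PySem.Str.strip name)).all (fun t => pvGood t.toList)
        = (PySem.Chars.split₀ name.toList).all pvGood := by
      rw [show PySem.Str.split₀ (PySem.Str.strip name)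
            = List.map String.ofList (PySem.Chars.split₀ (PySem.Str.strip name).toList) from rfl]
      rw [PySem.Str.toList_strip, split₀_strip, List.all_map]
      simp only [Function.comp_def, String.toList_ofList]
    rw [hmap]
    rfl
  rw [hA, hB]
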